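-- pv_equiv track=rewrite | github.com/JakeSaunders1995/comp16321MarkingMid | unpacked_repos/q77644po_prog3_spellchecker/spellcheck_q77644po.py | spell
-- ===== SOURCE A (Python) =====
-- def spell(s,dic):
--     puncNum=0
--     numNum=0
--     upNum=0
--     #--------------------------------------removing punctuations--------------------------------------------
--     #: the period, question mark, exclamation point, comma, colon, semicolon, dash, hyphen, brackets, braces, parentheses, apostrophe, quotation mark, and ellipsis
--     symbs=['.','?','!',',',':',';','–','—','-','[',']','{','}','(',')',"'",'"','…']
--
--     s2=''
--     for i in range(len(s)):
--         if s[i] in symbs: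
--             puncNum=puncNum+1
--         else:
--             s2=s2+s[i]
--
--     #---------------------------------------removing numbers-------------------------------------------------
--     numbers=['1','2','3','4','5','6','7','8','9','0']
--     s3=''
--     for i in range(len(s2)):
--         if s2[i] in numbers:
--             numNum=numNum+1
--         else:
--             s3=s3+s2[i]
--
--     #----------------------------------------lowercasing----------------------------------------------------
--     finalString=''
--     for i in range(len(s3)):
--         if s3[i].lower() != s3[i]:
--             finalString=finalString+s3[i].lower()
--             upNum=upNum+1
--         else:
--             finalString=finalString+s3[i]
--
--     #--------------------------------------------removing ''  and '\n' out of words array-----------------------------------------------------------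
--     words_s=finalString.split(' ')
--     words=[]
--     for i in range(len(words_s)):
--         if words_s[i]!='' and words_s[i]!='\n':
--             words.append(words_s[i])
--     #--------------------------------------------checking the dictioanry-----------------------------------------------------
--
--
--     dic=dic.split('\n')
--     incorrect=0
--     correct=0
--     for i in range(len(words)):
--         if words[i] in dic :
--             correct=correct+1
--
--         else:
--             incorrect=incorrect+1
--
--
--     message1='q77644po\nFormatting ###################\nNumber of upper case letters changed: ' + str(upNum) + '\nNumber of punctuations removed: ' + str(puncNum) + '\nNumber of numbers removed: ' + str(numNum) +'\n'
--     message2='Spellchecking ###################\nNumber of words: ' + str(len(words)) + '\nNumber of correct words: ' + str(correct) + '\nNumber of incorrect words: ' + str(incorrect)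
--
--     return(message1+message2)
-- ===== SOURCE B (Python) =====
-- def spell(s, dic):
--     # One pass over s replaces A's three sequential loops (and the s2/s3 intermediates).
--     puncNum = 0
--     numNum = 0
--     upNum = 0
--     out = []
--     for c in s:
--         if c in ".?!,:;–—-[]{}()'\"…":
--             puncNum += 1
--         elif c in "1234567890":
--             numNum += 1
--         elif c.lower() != c:
--             out.append(c.lower())
--             upNum += 1
--         else:
--             out.append(c)
--     finalString = ''.join(out)
--     words = [w for w in finalString.split(' ') if w != '' and w != '\n']
--     dic_words = dic.split('\n')
--     correct = len([w for w in words if w in dic_words])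
--     incorrect = len(words) - correct
--     message1 = 'q77644po\nFormatting ###################\nNumber of upper case letters changed: ' + str(upNum) + '\nNumber of punctuations removed: ' + str(puncNum) + '\nNumber of numbers removed: ' + str(numNum) + '\n'
--     message2 = 'Spellchecking ###################\nNumber of words: ' + str(len(words)) + '\nNumber of correct words: ' + str(correct) + '\nNumber of incorrect words: ' + str(incorrect)
--     return message1 + message2
-- ===== Notes on version B (the rewrite author's own statement) =====
-- stated objective: simpler
-- what changed: A's three sequential rebuild-the-string loops (punctuation, digits, uppercase) with the s2/s3 intermediate strings become one pass over s building a char list (joined once), the word filter and correct-count loops become comprehensions, and incorrect is derived as len(words)-correct instead of a second accumulator.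
import Mathlib
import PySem

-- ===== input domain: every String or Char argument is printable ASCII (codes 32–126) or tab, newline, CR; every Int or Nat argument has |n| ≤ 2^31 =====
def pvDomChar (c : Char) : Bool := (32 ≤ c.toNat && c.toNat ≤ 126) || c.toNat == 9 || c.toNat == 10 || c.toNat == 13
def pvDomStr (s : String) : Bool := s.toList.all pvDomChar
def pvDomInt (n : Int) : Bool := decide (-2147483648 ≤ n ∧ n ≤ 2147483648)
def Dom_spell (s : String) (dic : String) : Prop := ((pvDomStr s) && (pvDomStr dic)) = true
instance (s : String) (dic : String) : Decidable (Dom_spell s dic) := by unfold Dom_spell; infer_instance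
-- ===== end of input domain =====

-- B is a one-pass decomposition of A's three formatting loops; same output strings.

-- shared literal constants / the final message assembly (identical literal text in both Pythons)
def spellMsg (upNum puncNum numNum nWords correct incorrect : Int) : List Char :=
  ("q77644po\nFormatting ###################\nNumber of upper case letters changed: ").toList
  ++ PySem.Int.toChars upNum
  ++ ("\nNumber of punctuations removed: ").toList ++ PySem.Int.toChars puncNum
  ++ ("\nNumber of numbers removed: ").toList ++ PySem.Int.toChars numNum
  ++ ("\n").toList
  ++ ("Spellchecking ###################\nNumber of words: ").toList ++ PySem.Int.toChars nWords
  ++ ("\nNumber of correct words: ").toList ++ PySem.Int.toChars correct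
  ++ ("\nNumber of incorrect words: ").toList ++ PySem.Int.toChars incorrect

-- ===== PORT A =====
def spellSymbs : List Char := ['.','?','!',',',':',';','–','—','-','[',']','{','}','(',')','\'','"','…']
def spellNumbers : List Char := ['1','2','3','4','5','6','7','8','9','0']

def spell (s : String) (dic : String) : String :=
  -- removing punctuations
  let step1 := s.toList.foldl
    (fun (acc : Int × List Char) c =>
      if c ∈ spellSymbs then (acc.1 + 1, acc.2) else (acc.1, acc.2 ++ [c])) (0, [])
  let puncNum := step1.1
  let s2 := step1.2
  -- removing numbers
  let step2 := s2.foldl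
    (fun (acc : Int × List Char) c =>
      if c ∈ spellNumbers then (acc.1 + 1, acc.2) else (acc.1, acc.2 ++ [c])) (0, [])
  let numNum := step2.1
  let s3 := step2.2
  -- lowercasing
  let step3 := s3.foldl
    (fun (acc : Int × List Char) c =>
      if PySem.Chars.lowerChar c ≠ c then (acc.1 + 1, acc.2 ++ [PySem.Chars.lowerChar c])
      else (acc.1, acc.2 ++ [c])) (0, [])
  let upNum := step3.1
  let finalString := step3.2
  -- removing '' and '\n' out of words array
  let words_s := PySem.Chars.splitOn finalString [' ']
  let words := words_s.foldl
    (fun (acc : List (List Char)) w => if w ≠ [] ∧ w ≠ ['\n'] then acc ++ [w] else acc) []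
  -- checking the dictionary
  let dicl := PySem.Chars.splitOn dic.toList ['\n']
  let cnt := words.foldl
    (fun (acc : Int × Int) w => if w ∈ dicl then (acc.1 + 1, acc.2) else (acc.1, acc.2 + 1)) (0, 0)
  String.ofList (spellMsg upNum puncNum numNum (words.length : Int) cnt.1 cnt.2)

-- ===== PORT B =====
def spell_alt (s : String) (dic : String) : String :=
  -- one pass: ((puncNum, numNum), (upNum, out))
  let st := s.toList.foldl
    (fun (acc : (Int × Int) × (Int × List Char)) c =>
      if c ∈ (".?!,:;–—-[]{}()'\"…").toList then ((acc.1.1 + 1, acc.1.2), acc.2)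
      else if c ∈ ("1234567890").toList then ((acc.1.1, acc.1.2 + 1), acc.2)
      else if PySem.Chars.lowerChar c ≠ c then (acc.1, (acc.2.1 + 1, acc.2.2 ++ [PySem.Chars.lowerChar c]))
      else (acc.1, (acc.2.1, acc.2.2 ++ [c])))
    ((0, 0), (0, []))
  let finalString := st.2.2
  let words := (PySem.Chars.splitOn finalString [' ']).filter
    (fun w => decide (w ≠ [] ∧ w ≠ ['\n']))
  let dic_words := PySem.Chars.splitOn dic.toList ['\n']
  let correct : Int := ((words.filter (fun w => decide (w ∈ dic_words))).length : Int)
  let incorrect : Int := (words.length : Int) - correct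
  String.ofList (spellMsg st.2.1 st.1.1 st.1.2 (words.length : Int) correct incorrect)

-- ===== PRECONDITION & SPEC =====
def Spec_spell (s : String) (dic : String) (out : String) : Prop := out = spell_alt s dic
instance (s : String) (dic : String) (out : String) : Decidable (Spec_spell s dic out) := by unfold Spec_spell; infer_instance

-- ===== CLAIM (what is proved, stated in full; the proofs are below) =====
def Claim_equal_spell : Prop := ∀ (s : String) (dic : String), Dom_spell s dic → Spec_spell s dic (spell s dic)

-- ===== LEMMAS AND PROOFS =====

-- A's count-or-keep loop: count the matching chars, keep the rest in order.
theorem foldl_count_or_keep (p : Char → Prop) [DecidablePred p] (l : List Char) (a : Int) (s : List Char) :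
    l.foldl (fun (acc : Int × List Char) c =>
      if p c then (acc.1 + 1, acc.2) else (acc.1, acc.2 ++ [c])) (a, s)
    = (a + (l.countP (fun c => decide (p c)) : Int), s ++ l.filter (fun c => decide (¬ p c))) := by
  induction l generalizing a s with
  | nil => simp
  | cons h t ih =>
    rw [List.foldl_cons]
    by_cases hp : p h
    · rw [if_pos hp, ih]
      simp [hp]
      ring
    · rw [if_neg hp, ih]
      simp [hp]

-- A's lowercase loop: count changed chars, map lowerChar over the string.
theorem foldl_lower_loop (l : List Char) (a : Int) (s : List Char) :
    l.foldl (fun (acc : Int × List Char) c =>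
      if PySem.Chars.lowerChar c ≠ c then (acc.1 + 1, acc.2 ++ [PySem.Chars.lowerChar c])
      else (acc.1, acc.2 ++ [c])) (a, s)
    = (a + (l.countP (fun c => decide (PySem.Chars.lowerChar c ≠ c)) : Int),
       s ++ l.map PySem.Chars.lowerChar) := by
  induction l generalizing a s with
  | nil => simp
  | cons h t ih =>
    rw [List.foldl_cons]
    by_cases hp : PySem.Chars.lowerChar h ≠ h
    · rw [if_pos hp, ih]
      simp [hp]
      ring
    · rw [if_neg hp, ih]
      rw [ne_eq, not_not] at hp
      simp [hp]

-- B's single pass, characterised.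
theorem foldl_one_pass (P Nm : Char → Prop) [DecidablePred P] [DecidablePred Nm]
    (l : List Char) (p n u : Int) (s : List Char) :
    l.foldl (fun (acc : (Int × Int) × (Int × List Char)) c =>
      if P c then ((acc.1.1 + 1, acc.1.2), acc.2)
      else if Nm c then ((acc.1.1, acc.1.2 + 1), acc.2)
      else if PySem.Chars.lowerChar c ≠ c then (acc.1, (acc.2.1 + 1, acc.2.2 ++ [PySem.Chars.lowerChar c]))
      else (acc.1, (acc.2.1, acc.2.2 ++ [c]))) ((p, n), (u, s))
    = ((p + (l.countP (fun c => decide (P c)) : Int),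
        n + (l.countP (fun c => decide (¬ P c ∧ Nm c)) : Int)),
       (u + (l.countP (fun c => decide (¬ P c ∧ ¬ Nm c ∧ PySem.Chars.lowerChar c ≠ c)) : Int),
        s ++ (l.filter (fun c => decide (¬ P c ∧ ¬ Nm c))).map PySem.Chars.lowerChar)) := by
  induction l generalizing p n u s with
  | nil => simp
  | cons h t ih =>
    rw [List.foldl_cons]
    by_cases hP : P h
    · rw [if_pos hP, ih]
      simp [hP]
      ring
    · rw [if_neg hP]
      by_cases hN : Nm h
      · rw [if_pos hN, ih]
        simp [hP, hN]
        ring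
      · rw [if_neg hN]
        by_cases hU : PySem.Chars.lowerChar h ≠ h
        · rw [if_pos hU, ih]
          simp [hP, hN, hU]
          ring
        · rw [if_neg hU, ih]
          rw [ne_eq, not_not] at hU
          simp [hP, hN, hU]

-- A's correct/incorrect loop.
theorem foldl_correct_incorrect (dicl : List (List Char)) (ws : List (List Char)) (a b : Int) :
    ws.foldl (fun (acc : Int × Int) w =>
      if w ∈ dicl then (acc.1 + 1, acc.2) else (acc.1, acc.2 + 1)) (a, b)
    = (a + ((ws.filter (fun w => decide (w ∈ dicl))).length : Int),
       b + ((ws.length : Int) - ((ws.filter (fun w => decide (w ∈ dicl))).length : Int))) := by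
  induction ws generalizing a b with
  | nil => simp
  | cons h t ih =>
    rw [List.foldl_cons]
    by_cases hm : h ∈ dicl
    · rw [if_pos hm, ih]
      simp [hm]
      ring
    · rw [if_neg hm, ih]
      simp [hm]
      ring

-- ===== VERDICT (by name: the statement is the Claim_ definition above) =====
theorem spell_spec : Claim_equal_spell := by
  intro s dic _
  unfold Spec_spell spell spell_alt
  simp only [foldl_count_or_keep, foldl_lower_loop, foldl_one_pass,
      PySem.List.foldl_append_ite_eq_filter, foldl_correct_incorrect,
      zero_add, List.nil_append]
  have hS : (".?!,:;–—-[]{}()'\"…").toList = spellSymbs := by decide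
  have hN : ("1234567890").toList = spellNumbers := by decide
  simp only [hS, hN, List.countP_filter, List.filter_filter]
  have hp1 : ∀ (l : List Char),
      List.countP (fun c => decide (c ∈ spellNumbers) && decide (c ∉ spellSymbs)) l
      = List.countP (fun c => decide (c ∉ spellSymbs ∧ c ∈ spellNumbers)) l := by
    intro l; apply List.countP_congr; intro x _
    by_cases h1 : x ∈ spellSymbs <;> by_cases h2 : x ∈ spellNumbers <;> simp [h1, h2]
  have hp2 : ∀ (l : List Char),
      List.countP (fun c => decide (PySem.Chars.lowerChar c ≠ c) && (decide (c ∉ spellNumbers) && decide (c ∉ spellSymbs))) l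
      = List.countP (fun c => decide (c ∉ spellSymbs ∧ c ∉ spellNumbers ∧ PySem.Chars.lowerChar c ≠ c)) l := by
    intro l; apply List.countP_congr; intro x _
    by_cases h1 : x ∈ spellSymbs <;> by_cases h2 : x ∈ spellNumbers <;>
      by_cases h3 : PySem.Chars.lowerChar x ≠ x <;> simp [h1, h2, h3]
  have hp3 : ∀ (l : List Char),
      List.filter (fun c => decide (c ∉ spellNumbers) && decide (c ∉ spellSymbs)) l
      = List.filter (fun c => decide (c ∉ spellSymbs ∧ c ∉ spellNumbers)) l := by
    intro l; apply List.filter_congr; intro x _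
    by_cases h1 : x ∈ spellSymbs <;> by_cases h2 : x ∈ spellNumbers <;> simp [h1, h2]
  rw [hp1, hp2, hp3]
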